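-- pv_equiv track=rewrite | github.com/smith-chem-wisc/SampleSpecificDBGenerator | novelsplices.py | generate_tryptic_peps
-- ===== SOURCE A (Python) =====
-- def generate_tryptic_peps(pep_seq):
--     tryptic_peps = []
--     k_fragments = pep_seq.split('K')
--     for i, k_fragment in enumerate(k_fragments):
--         if i != len(k_fragments) - 1: kr_fragments = (k_fragment + 'K').split('R')
--         else: kr_fragments = k_fragment.split('R')
--         for j, kr_fragment in enumerate(kr_fragments):
--             if j != len(kr_fragments) - 1: tryptic_peps.append(kr_fragment + 'R')
--             else: tryptic_peps.append(kr_fragment)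
--     while tryptic_peps and not tryptic_peps[-1]: tryptic_peps.pop() #remove empty elements at end of list
--     return tryptic_peps
-- ===== SOURCE B (Python) =====
-- def generate_tryptic_peps(pep_seq):
--     peps = []
--     buf = []
--     for c in pep_seq:
--         buf.append(c)
--         if c == 'K' or c == 'R':
--             peps.append(''.join(buf))
--             buf = []
--     peps.append(''.join(buf))
--     if peps[-1] == '':
--         peps.pop()
--     return peps
-- ===== Notes on version B (the rewrite author's own statement) =====
-- stated objective: simpler
-- what changed: Replaces A's two nested split/reattach passes (split on K, re-split each fragment on R, re-append separators, then strip trailing empties) with a single left-to-right scan that cuts after each K or R and pops at most one trailing empty.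
import Mathlib
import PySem

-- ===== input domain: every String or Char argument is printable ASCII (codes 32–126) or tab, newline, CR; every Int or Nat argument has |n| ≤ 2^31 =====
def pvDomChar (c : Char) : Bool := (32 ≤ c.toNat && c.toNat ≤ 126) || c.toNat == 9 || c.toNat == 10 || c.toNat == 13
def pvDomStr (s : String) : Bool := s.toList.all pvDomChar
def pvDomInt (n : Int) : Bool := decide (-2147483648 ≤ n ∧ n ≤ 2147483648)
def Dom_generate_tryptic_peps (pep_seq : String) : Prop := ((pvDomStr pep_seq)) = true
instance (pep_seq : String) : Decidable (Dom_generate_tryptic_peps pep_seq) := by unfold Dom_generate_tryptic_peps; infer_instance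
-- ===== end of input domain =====

-- B replaces A's nested split-on-K / split-on-R / reattach passes by one left-to-right scan that cuts after each K or R (simpler, one pass).


-- ===== PORT A =====
-- A's trailing 'while tryptic_peps and not tryptic_peps[-1]: tryptic_peps.pop()' loop, acting on the reversed list
def popRevA : List String → List String
  | [] => []
  | x :: xs => if x = "" then popRevA xs else x :: xs

def generate_tryptic_peps (pep_seq : String) : List String :=
  let k_fragments := (PySem.Str.split? pep_seq "K").getD []
  let tryptic_peps := (PySem.List.enumerate k_fragments).foldl (fun tp p =>
    let kr_fragments :=
      if p.1 ≠ (k_fragments.length : Int) - 1 then (PySem.Str.split? (p.2 ++ "K") "R").getD []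
      else (PySem.Str.split? p.2 "R").getD []
    (PySem.List.enumerate kr_fragments).foldl (fun tp2 q =>
      if q.1 ≠ (kr_fragments.length : Int) - 1 then tp2 ++ [q.2 ++ "R"] else tp2 ++ [q.2]) tp) []
  (popRevA tryptic_peps.reverse).reverse

-- ===== PORT B =====
-- one scan step: extend the buffer; after a K or R, flush the buffer to the output
def bStep (st : List String × List Char) (c : Char) : List String × List Char :=
  let buf := st.2 ++ [c]
  if c = 'K' ∨ c = 'R' then (st.1 ++ [String.ofList buf], []) else (st.1, buf)

def generate_tryptic_peps_alt (pep_seq : String) : List String :=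
  let st := pep_seq.toList.foldl bStep ([], [])
  let peps := st.1 ++ [String.ofList st.2]
  if peps.getLast? = some "" then peps.dropLast else peps

-- ===== PRECONDITION & SPEC =====
def Spec_generate_tryptic_peps (pep_seq : String) (out : List String) : Prop := out = generate_tryptic_peps_alt pep_seq
instance (pep_seq : String) (out : List String) : Decidable (Spec_generate_tryptic_peps pep_seq out) := by unfold Spec_generate_tryptic_peps; infer_instance

-- ===== CLAIM (what is proved, stated in full; the proofs are below) =====
def Claim_equal_generate_tryptic_peps : Prop := ∀ (pep_seq : String), Dom_generate_tryptic_peps pep_seq → Spec_generate_tryptic_peps pep_seq (generate_tryptic_peps pep_seq)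

-- ===== LEMMAS AND PROOFS =====
def splitK (k : Char) : List Char → List (List Char)
  | [] => [[]]
  | c :: cs => if c = k then [] :: splitK k cs else (splitK k cs).modifyHead (c :: ·)
theorem splitK_ne_nil (k : Char) (l : List Char) : splitK k l ≠ [] := by
  induction l with
  | nil => simp [splitK]
  | cons c cs ih => simp only [splitK]; split_ifs <;> simp_all

theorem splitOn_go_eq (k : Char) (l : List Char) (fuel : Nat) (cur : List Char) (acc : List (List Char))
    (h : l.length ≤ fuel) :
    PySem.Chars.splitOn.go [k] fuel l cur acc = acc.reverse ++ (splitK k l).modifyHead (cur.reverse ++ ·) := by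
  induction l generalizing fuel cur acc with
  | nil =>
    rw [PySem.Chars.splitOn.go.eq_def]
    cases fuel <;> simp [splitK]
  | cons c rest ih =>
    cases fuel with
    | zero => simp at h
    | succ f =>
      rw [PySem.Chars.splitOn.go.eq_def]
      simp only [List.isPrefixOf, Bool.and_true]
      by_cases hc : c = k
      · subst hc
        simp only [BEq.rfl, if_pos rfl, if_true, List.length_cons] at *
        simp only [List.length_nil, List.drop_succ_cons, List.drop_zero]
        rw [ih f [] (cur.reverse :: acc) (by omega)]
        simp only [splitK, if_pos rfl]
        cases splitK c rest <;> simp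
      · have hbe : (k == c) = false := beq_eq_false_iff_ne.mpr (fun h' => hc h'.symm)
        rw [if_neg (by simp [hbe])]
        simp only [List.length_cons] at h
        rw [ih f (c :: cur) acc (by omega)]
        simp only [splitK, if_neg hc]
        cases hK : splitK k rest with
        | nil => exact absurd hK (splitK_ne_nil k rest)
        | cons a as => simp

theorem splitOn_single (k : Char) (l : List Char) : PySem.Chars.splitOn l [k] = splitK k l := by
  rw [PySem.Chars.splitOn, splitOn_go_eq k l _ [] [] (by omega)]
  cases hK : splitK k l with
  | nil => exact absurd hK (splitK_ne_nil k l)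
  | cons a as => simp

theorem str_split_single (s : String) (k : Char) :
    (PySem.Str.split? s (String.ofList [k])).getD [] = (splitK k s.toList).map String.ofList := by
  have h := PySem.Str.split?_map s (String.ofList [k])
  simp only [String.toList_ofList] at h
  rw [PySem.Chars.split?] at h
  simp only [List.isEmpty_cons, if_neg] at h
  rw [splitOn_single] at h
  cases hs : PySem.Str.split? s (String.ofList [k]) with
  | none => rw [hs] at h; simp at h
  | some m =>
    rw [hs] at h
    rw [if_neg (by simp)] at h
    simp only [Option.map_some, Option.some.injEq] at h
    simp only [Option.getD_some]
    have h2 : (m.map String.toList).map String.ofList = (splitK k s.toList).map String.ofList := by rw [h]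
    simpa [List.map_map, Function.comp_def] using h2

def lastMap {α β : Type} (fmid flast : α → List β) : List α → List β
  | [] => []
  | [x] => flast x
  | x :: y :: ys => fmid x ++ lastMap fmid flast (y :: ys)

theorem enum_fold_lastMap {α β : Type} (fmid flast : α → List β) (xs : List α) (C n : Int) (init : List β)
    (h : C = n + xs.length) :
    (PySem.List.enumerate xs n).foldl (fun acc p => if p.1 ≠ C - 1 then acc ++ fmid p.2 else acc ++ flast p.2) init
      = init ++ lastMap fmid flast xs := by
  induction xs generalizing n init with
  | nil => simp [PySem.List.enumerate, lastMap]
  | cons x rest ih =>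
    rw [PySem.List.enumerate]
    cases rest with
    | nil =>
      simp only [List.length_cons, List.length_nil, Nat.cast_one, Nat.cast_zero] at h
      simp [PySem.List.enumerate, lastMap, h]
    | cons y ys =>
      simp only [List.foldl_cons]
      have hne : n ≠ C - 1 := by simp [h]; omega
      rw [if_pos hne]
      rw [ih (n+1) (init ++ fmid x) (by simp at h ⊢; omega)]
      simp [lastMap]

def splitAfterKR : List Char → List (List Char)
  | [] => [[]]
  | c :: cs => if c = 'K' ∨ c = 'R' then [c] :: splitAfterKR cs else (splitAfterKR cs).modifyHead (c :: ·)

def splitAfterR : List Char → List (List Char)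
  | [] => [[]]
  | c :: cs => if c = 'R' then [c] :: splitAfterR cs else (splitAfterR cs).modifyHead (c :: ·)

theorem splitAfterR_ne_nil (l : List Char) : splitAfterR l ≠ [] := by
  induction l with
  | nil => simp [splitAfterR]
  | cons c cs ih => simp only [splitAfterR]; split_ifs <;> simp_all

theorem splitAfterKR_ne_nil (l : List Char) : splitAfterKR l ≠ [] := by
  induction l with
  | nil => simp [splitAfterKR]
  | cons c cs ih => simp only [splitAfterKR]; split_ifs <;> simp_all

theorem lastMap_map {α β γ : Type} (g : α → β) (fmid flast : β → List γ) (xs : List α) :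
    lastMap fmid flast (xs.map g) = lastMap (fun x => fmid (g x)) (fun x => flast (g x)) xs := by
  induction xs with
  | nil => simp [lastMap]
  | cons x rest ih =>
    cases rest with
    | nil => simp [lastMap]
    | cons y ys => simp only [List.map_cons, lastMap] at *; rw [ih]

theorem lastMap_congr {α β : Type} (fmid flast fmid' flast' : α → List β) (xs : List α)
    (h1 : ∀ x, fmid x = fmid' x) (h2 : ∀ x, flast x = flast' x) :
    lastMap fmid flast xs = lastMap fmid' flast' xs := by
  induction xs with
  | nil => simp [lastMap]
  | cons x rest ih =>
    cases rest with
    | nil => simp [lastMap, h2]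
    | cons y ys => simp only [lastMap] at *; rw [h1, ih]

theorem reattachR_splitK (t : List Char) :
    lastMap (fun x => [x ++ ['R']]) (fun x => [x]) (splitK 'R' t) = splitAfterR t := by
  induction t with
  | nil => simp [splitK, splitAfterR, lastMap]
  | cons c cs ih =>
    by_cases hc : c = 'R'
    · subst hc
      simp only [splitK, if_pos rfl, splitAfterR]
      cases hK : splitK 'R' cs with
      | nil => exact absurd hK (splitK_ne_nil _ _)
      | cons a as => rw [hK] at ih; simp [lastMap, ← ih]
    · simp only [splitK, splitAfterR, if_neg hc]
      cases hK : splitK 'R' cs with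
      | nil => exact absurd hK (splitK_ne_nil _ _)
      | cons a as =>
        rw [hK] at ih
        cases as with
        | nil =>
          simp only [lastMap, List.modifyHead_cons] at *
          rw [← ih]
          simp [splitAfterR, if_neg hc]
        | cons b bs =>
          simp only [lastMap, List.modifyHead_cons] at *
          rw [← ih]
          cases hS : splitAfterR cs with
          | nil => exact absurd hS (splitAfterR_ne_nil _)
          | cons s ss => simp_all

theorem lastMap_modifyHead_cons (c : Char) (L : List (List Char)) (hL : L ≠ []) :
    lastMap (fun x => splitAfterR (x ++ ['K'])) (fun x => splitAfterR x) (L.modifyHead (c :: ·))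
      = if c = 'R' then ['R'] :: lastMap (fun x => splitAfterR (x ++ ['K'])) (fun x => splitAfterR x) L
        else (lastMap (fun x => splitAfterR (x ++ ['K'])) (fun x => splitAfterR x) L).modifyHead (c :: ·) := by
  cases L with
  | nil => exact absurd rfl hL
  | cons x ys =>
    cases ys with
    | nil =>
      simp only [List.modifyHead_cons, lastMap]
      by_cases hc : c = 'R'
      · subst hc; simp [splitAfterR]
      · simp [splitAfterR, if_neg hc]
    | cons y ys' =>
      simp only [List.modifyHead_cons, lastMap]
      by_cases hc : c = 'R'
      · subst hc
        rw [if_pos rfl]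
        have hx : splitAfterR ('R' :: (x ++ ['K'])) = ['R'] :: splitAfterR (x ++ ['K']) := by
          simp [splitAfterR]
        rw [List.cons_append, hx]
        simp
      · rw [if_neg hc]
        have h1 : splitAfterR ((c :: x) ++ ['K']) = (splitAfterR (x ++ ['K'])).modifyHead (c :: ·) := by
          simp [splitAfterR, if_neg hc]
        rw [h1]
        cases hS : splitAfterR (x ++ ['K']) with
        | nil => exact absurd hS (splitAfterR_ne_nil _)
        | cons s ss => simp

theorem crux (l : List Char) :
    lastMap (fun x => splitAfterR (x ++ ['K'])) (fun x => splitAfterR x) (splitK 'K' l) = splitAfterKR l := by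
  induction l with
  | nil => simp [splitK, splitAfterKR, lastMap, splitAfterR]
  | cons c cs ih =>
    by_cases hcK : c = 'K'
    · subst hcK
      simp only [splitK, if_pos rfl, splitAfterKR, if_pos (Or.inl rfl)]
      cases hK : splitK 'K' cs with
      | nil => exact absurd hK (splitK_ne_nil _ _)
      | cons a as =>
        rw [hK] at ih
        simp only [if_true, true_or, lastMap]
        have h0 : splitAfterR ['K'] = [['K']] := by simp [splitAfterR]
        simp [h0, ih]
    · simp only [splitK, if_neg hcK]
      rw [lastMap_modifyHead_cons c _ (splitK_ne_nil _ _), ih]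
      by_cases hcR : c = 'R'
      · subst hcR; simp [splitAfterKR]
      · rw [if_neg hcR]
        simp [splitAfterKR, if_neg (by tauto : ¬ (c = 'K' ∨ c = 'R'))]

theorem bfold_inv (l : List Char) (peps : List String) (buf : List Char) :
    (l.foldl bStep (peps, buf)).1 ++ [String.ofList (l.foldl bStep (peps, buf)).2]
      = peps ++ ((splitAfterKR l).modifyHead (buf ++ ·)).map String.ofList := by
  induction l generalizing peps buf with
  | nil => simp [splitAfterKR]
  | cons c cs ih =>
    simp only [List.foldl_cons, bStep]
    by_cases hc : c = 'K' ∨ c = 'R'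
    · rw [if_pos hc]
      rw [ih]
      simp only [splitAfterKR, if_pos hc, List.modifyHead_cons, List.map_cons]
      cases hS : splitAfterKR cs with
      | nil => exact absurd hS (splitAfterKR_ne_nil _)
      | cons s ss => simp
    · rw [if_neg hc]
      rw [ih]
      simp only [splitAfterKR, if_neg hc]
      cases hS : splitAfterKR cs with
      | nil => exact absurd hS (splitAfterKR_ne_nil _)
      | cons s ss => simp

theorem splitAfterKR_dropLast_ne_nil (l : List Char) : ∀ x ∈ (splitAfterKR l).dropLast, x ≠ [] := by
  induction l with
  | nil => simp [splitAfterKR]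
  | cons c cs ih =>
    simp only [splitAfterKR]
    by_cases hc : c = 'K' ∨ c = 'R'
    · rw [if_pos hc]
      cases hS : splitAfterKR cs with
      | nil => exact absurd hS (splitAfterKR_ne_nil _)
      | cons s ss =>
        rw [hS] at ih
        intro x hx
        simp only [List.dropLast_cons_of_ne_nil (by simp : s :: ss ≠ ([] : List (List Char))), List.mem_cons] at hx
        rcases hx with h | h
        · subst h; simp
        · exact ih x h
    · rw [if_neg hc]
      cases hS : splitAfterKR cs with
      | nil => exact absurd hS (splitAfterKR_ne_nil _)
      | cons s ss =>
        rw [hS] at ih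
        cases ss with
        | nil => simp
        | cons t ts =>
          intro x hx
          simp only [List.modifyHead_cons,
            List.dropLast_cons_of_ne_nil (by simp : t :: ts ≠ ([] : List (List Char))),
            List.mem_cons] at hx
          rcases hx with h | h
          · subst h; simp
          · exact ih x (by simp [List.dropLast_cons_of_ne_nil, h])

theorem popRevA_all_ne (l : List String) (h : ∀ x ∈ l, x ≠ "") : popRevA l = l := by
  cases l with
  | nil => rfl
  | cons x xs => simp only [popRevA]; rw [if_neg (h x (by simp))]

theorem pop_eq (P : List String) (h : ∀ x ∈ P.dropLast, x ≠ "") :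
    (popRevA P.reverse).reverse = if P.getLast? = some "" then P.dropLast else P := by
  rcases List.eq_nil_or_concat P with rfl | ⟨Q, x, rfl⟩
  · simp [popRevA]
  · rw [List.concat_eq_append] at *
    rw [List.reverse_append, List.reverse_singleton, List.singleton_append]
    simp only [popRevA]
    have hd : (Q ++ [x]).dropLast = Q := by simp
    rw [hd] at h
    by_cases hx : x = ""
    · rw [if_pos hx]
      rw [popRevA_all_ne Q.reverse (by intro y hy; exact h y (by simpa using hy))]
      simp [hd, hx]
    · rw [if_neg hx]
      rw [if_neg (by simp [List.getLast?_concat, hx])]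
      simp

theorem map_lastMap {α β γ : Type} (g : β → γ) (f1 f2 : α → List β) (xs : List α) :
    (lastMap f1 f2 xs).map g = lastMap (fun x => (f1 x).map g) (fun x => (f2 x).map g) xs := by
  induction xs with
  | nil => simp [lastMap]
  | cons x rest ih =>
    cases rest with
    | nil => simp [lastMap]
    | cons y ys => simp only [lastMap, List.map_append] at *; rw [ih]

theorem A_prepop (l : List Char) (k_fragments : List String)
    (hk : k_fragments = (splitK 'K' l).map String.ofList) :
    (PySem.List.enumerate k_fragments).foldl (fun tp p =>
      let kr_fragments :=
        if p.1 ≠ (k_fragments.length : Int) - 1 then (PySem.Str.split? (p.2 ++ "K") "R").getD []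
        else (PySem.Str.split? p.2 "R").getD []
      (PySem.List.enumerate kr_fragments).foldl (fun tp2 q =>
        if q.1 ≠ (kr_fragments.length : Int) - 1 then tp2 ++ [q.2 ++ "R"] else tp2 ++ [q.2]) tp) []
      = (splitAfterKR l).map String.ofList := by
  have hinner : ∀ (kr : List String) (tp : List String),
      (PySem.List.enumerate kr).foldl (fun tp2 q =>
        if q.1 ≠ (kr.length : Int) - 1 then tp2 ++ [q.2 ++ "R"] else tp2 ++ [q.2]) tp
      = tp ++ lastMap (fun s => [s ++ "R"]) (fun s => [s]) kr := by
    intro kr tp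
    exact enum_fold_lastMap (fun s => [s ++ "R"]) (fun s => [s]) kr (kr.length : Int) 0 tp (by simp)
  have hfun : (fun (tp : List String) (p : Int × String) =>
      let kr_fragments :=
        if p.1 ≠ (k_fragments.length : Int) - 1 then (PySem.Str.split? (p.2 ++ "K") "R").getD []
        else (PySem.Str.split? p.2 "R").getD []
      (PySem.List.enumerate kr_fragments).foldl (fun tp2 q =>
        if q.1 ≠ (kr_fragments.length : Int) - 1 then tp2 ++ [q.2 ++ "R"] else tp2 ++ [q.2]) tp)
      = (fun tp p =>
        if p.1 ≠ (k_fragments.length : Int) - 1 then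
          tp ++ lastMap (fun s => [s ++ "R"]) (fun s => [s]) ((PySem.Str.split? (p.2 ++ "K") "R").getD [])
        else
          tp ++ lastMap (fun s => [s ++ "R"]) (fun s => [s]) ((PySem.Str.split? p.2 "R").getD [])) := by
    funext tp p
    by_cases hp : p.1 ≠ (k_fragments.length : Int) - 1
    · simp only [if_pos hp, hinner]
    · simp only [if_neg hp, hinner]
  rw [hfun, enum_fold_lastMap
      (fun s => lastMap (fun s => [s ++ "R"]) (fun s => [s]) ((PySem.Str.split? (s ++ "K") "R").getD []))
      (fun s => lastMap (fun s => [s ++ "R"]) (fun s => [s]) ((PySem.Str.split? s "R").getD []))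
      k_fragments (k_fragments.length : Int) 0 [] (by simp)]
  rw [List.nil_append, hk, lastMap_map]
  have hK : ("K" : String) = String.ofList ['K'] := rfl
  have hR : ("R" : String) = String.ofList ['R'] := rfl
  have hmid : ∀ x : List Char,
      lastMap (fun s => [s ++ "R"]) (fun s => [s]) ((PySem.Str.split? (String.ofList x ++ "K") "R").getD [])
        = (splitAfterR (x ++ ['K'])).map String.ofList := by
    intro x
    have h1 : String.ofList x ++ "K" = String.ofList (x ++ ['K']) := by simp [hK]
    rw [h1, hR, str_split_single, lastMap_map]
    rw [← reattachR_splitK (x ++ ['K']), map_lastMap]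
    have h2 : (String.ofList (x ++ ['K'])).toList = x ++ ['K'] := by simp
    rw [h2]
    apply lastMap_congr
    · intro y; simp [hR]
    · intro y; simp
  have hlast : ∀ x : List Char,
      lastMap (fun s => [s ++ "R"]) (fun s => [s]) ((PySem.Str.split? (String.ofList x) "R").getD [])
        = (splitAfterR x).map String.ofList := by
    intro x
    rw [hR, str_split_single, lastMap_map]
    rw [← reattachR_splitK x, map_lastMap]
    have h2 : (String.ofList x).toList = x := by simp
    rw [h2]
    apply lastMap_congr
    · intro y; simp [hR]
    · intro y; simp
  rw [lastMap_congr _ _ _ _ _ (fun x => hmid x) (fun x => hlast x)]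
  rw [← crux l, map_lastMap]


-- ===== VERDICT (by name: the statement is the Claim_ definition above) =====
theorem generate_tryptic_peps_spec : Claim_equal_generate_tryptic_peps := by
  intro pep_seq _
  simp only [Spec_generate_tryptic_peps, generate_tryptic_peps, generate_tryptic_peps_alt]
  have hK : ("K" : String) = String.ofList ['K'] := rfl
  have hk : (PySem.Str.split? pep_seq "K").getD [] = (splitK 'K' pep_seq.toList).map String.ofList := by
    rw [hK, str_split_single]
  rw [A_prepop pep_seq.toList _ hk]
  have hb := bfold_inv pep_seq.toList [] []
  simp only [List.nil_append] at hb
  have hid : List.modifyHead (fun x => x) (splitAfterKR pep_seq.toList) = splitAfterKR pep_seq.toList := by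
    cases splitAfterKR pep_seq.toList <;> simp
  rw [hid] at hb
  rw [hb]
  rw [pop_eq]
  intro x hx
  rw [← List.map_dropLast] at hx
  rcases List.mem_map.mp hx with ⟨y, hy, rfl⟩
  intro hcon
  have : y = [] := by
    have := congrArg String.toList hcon
    simpa using this
  exact splitAfterKR_dropLast_ne_nil pep_seq.toList y hy this
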